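-- pv_equiv track=rewrite | github.com/Mabitsela12/ai-career-guidances | career_ai.py | refine_jobs_based_on_cv
-- ===== SOURCE A (Python) =====
-- def refine_jobs_based_on_cv(cv_text, initial_jobs):
--     skills_mentioned = ["Python", "Django", "Data Analysis", "Machine Learning"]
--     refined_jobs = []
--     for job in initial_jobs:
--         for skill in skills_mentioned:
--             if skill.lower() in cv_text.lower():
--                 refined_jobs.append(job)
--                 break
--     return refined_jobs if refined_jobs else initial_jobs
-- ===== SOURCE B (Python) =====
-- def refine_jobs_based_on_cv(cv_text, initial_jobs):
--     skills_mentioned = ["Python", "Django", "Data Analysis", "Machine Learning"]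
--     cv_lower = cv_text.lower()
--     matched = any(skill.lower() in cv_lower for skill in skills_mentioned)
--     refined_jobs = list(initial_jobs) if matched else []
--     return refined_jobs if refined_jobs else initial_jobs
-- ===== Notes on version B (the rewrite author's own statement) =====
-- stated objective: faster
-- what changed: The skill test does not depend on the job, so B hoists it out of the job loop: one any() over the four skills' substring checks plus a single list copy replaces A's nested jobs-by-skills loop that re-lowers and re-scans cv_text for every job.
import Mathlib
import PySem

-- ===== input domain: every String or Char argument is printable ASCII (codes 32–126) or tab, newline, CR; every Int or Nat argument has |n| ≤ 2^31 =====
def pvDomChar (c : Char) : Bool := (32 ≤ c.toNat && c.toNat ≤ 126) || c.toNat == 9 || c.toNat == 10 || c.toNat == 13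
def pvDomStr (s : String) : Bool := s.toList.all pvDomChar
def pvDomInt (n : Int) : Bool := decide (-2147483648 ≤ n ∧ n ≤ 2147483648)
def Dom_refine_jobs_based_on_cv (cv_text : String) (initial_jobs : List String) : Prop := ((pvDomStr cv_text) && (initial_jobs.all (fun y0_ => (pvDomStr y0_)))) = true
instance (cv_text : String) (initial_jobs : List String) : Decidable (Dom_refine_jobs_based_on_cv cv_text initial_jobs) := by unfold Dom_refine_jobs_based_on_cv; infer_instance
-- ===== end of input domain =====

-- B hoists the job-independent skill test out of the job loop: one any() over skills, then one list build (simpler; return-value equivalence only — neither program mutates its arguments).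
-- ===== PORT A =====
def pvSkills : List String := ["Python", "Django", "Data Analysis", "Machine Learning"]

-- inner 'for skill in skills_mentioned: if skill.lower() in cv_text.lower(): append job; break'
def pvInnerA (cv_text : String) (job : String) (skills : List String) (acc : List String) : List String :=
  match skills with
  | [] => acc
  | s :: rest =>
      if PySem.Str.isIn (PySem.Str.lower s) (PySem.Str.lower cv_text) then acc ++ [job]
      else pvInnerA cv_text job rest acc

def refine_jobs_based_on_cv (cv_text : String) (initial_jobs : List String) : List String :=
  let refined_jobs := initial_jobs.foldl (fun acc job => pvInnerA cv_text job pvSkills acc) []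
  if refined_jobs.isEmpty then initial_jobs else refined_jobs

-- ===== PORT B =====
def refine_jobs_based_on_cv_alt (cv_text : String) (initial_jobs : List String) : List String :=
  let cv_lower := PySem.Str.lower cv_text
  let matched := pvSkills.any (fun skill => PySem.Str.isIn (PySem.Str.lower skill) cv_lower)
  let refined_jobs := if matched then initial_jobs else []
  if refined_jobs.isEmpty then initial_jobs else refined_jobs

-- ===== PRECONDITION & SPEC =====
def Spec_refine_jobs_based_on_cv (cv_text : String) (initial_jobs : List String) (out : List String) : Prop := out = refine_jobs_based_on_cv_alt cv_text initial_jobs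
instance (cv_text : String) (initial_jobs : List String) (out : List String) : Decidable (Spec_refine_jobs_based_on_cv cv_text initial_jobs out) := by unfold Spec_refine_jobs_based_on_cv; infer_instance

-- ===== CLAIM (what is proved, stated in full; the proofs are below) =====
def Claim_equal_refine_jobs_based_on_cv : Prop := ∀ (cv_text : String) (initial_jobs : List String), Dom_refine_jobs_based_on_cv cv_text initial_jobs → Spec_refine_jobs_based_on_cv cv_text initial_jobs (refine_jobs_based_on_cv cv_text initial_jobs)

-- ===== LEMMAS AND PROOFS =====

lemma innerA_eq (cv_text job : String) (skills : List String) (acc : List String) :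
    pvInnerA cv_text job skills acc =
      if skills.any (fun s => PySem.Str.isIn (PySem.Str.lower s) (PySem.Str.lower cv_text))
      then acc ++ [job] else acc := by
  induction skills with
  | nil => rfl
  | cons s rest ih =>
      rw [pvInnerA, List.any_cons]
      by_cases h : PySem.Str.isIn (PySem.Str.lower s) (PySem.Str.lower cv_text) = true
      · rw [if_pos h, if_pos (by rw [h, Bool.true_or])]
      · rw [if_neg h, ih, Bool.not_eq_true] at *
        rw [h, Bool.false_or]

lemma foldlA_eq (cv_text : String) (jobs : List String) :
    jobs.foldl (fun acc job => pvInnerA cv_text job pvSkills acc) [] =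
      if pvSkills.any (fun s => PySem.Str.isIn (PySem.Str.lower s) (PySem.Str.lower cv_text))
      then jobs else [] := by
  by_cases h : pvSkills.any (fun s => PySem.Str.isIn (PySem.Str.lower s) (PySem.Str.lower cv_text)) = true
  · rw [if_pos h]
    suffices hs : ∀ acc : List String,
        jobs.foldl (fun acc job => pvInnerA cv_text job pvSkills acc) acc = acc ++ jobs by
      simpa using hs []
    induction jobs with
    | nil => intro acc; simp
    | cons j t ih => intro acc; rw [List.foldl_cons, innerA_eq, if_pos h, ih]; simp
  · rw [if_neg h]
    induction jobs with
    | nil => rfl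
    | cons j t ih => rw [List.foldl_cons, innerA_eq, if_neg h]; exact ih

-- ===== VERDICT (by name: the statement is the Claim_ definition above) =====
theorem refine_jobs_based_on_cv_spec : Claim_equal_refine_jobs_based_on_cv := by
  intro cv_text initial_jobs _
  unfold Spec_refine_jobs_based_on_cv refine_jobs_based_on_cv refine_jobs_based_on_cv_alt
  rw [foldlA_eq]
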